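-- pv_equiv track=rewrite | github.com/Buypolar-Capital/buypolarcapital | src/buypolarcapital/strategies/rv/python/chordcaged.py | generate_chord_vectors
-- ===== SOURCE A (Python) =====
-- import itertools
--
-- def generate_chord_vectors(chord_positions):
--     """Generates all possible chord vectors while ensuring repetition."""
--     possible_vectors = []
--
--     for combination in itertools.product(*chord_positions):
--         vector = [-1] * 6  # Default to muted strings
--
--         for string, fret, note in combination:
--             vector[6 - string] = fret  # Assign frets to string positions
--
--         possible_vectors.append(vector)
--
--     return possible_vectors
-- ===== SOURCE B (Python) =====
-- def generate_chord_vectors(chord_positions):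
--     """Mixed-radix enumeration: the k-th output vector is computed directly from
--     the index k (last group varies fastest), without materializing combinations."""
--     total = 1
--     weights = []
--     for group in reversed(chord_positions):
--         weights.append(total)
--         total *= len(group)
--     weights.reverse()
--     out = []
--     for i in range(total):
--         vec = [-1] * 6
--         for group, w in zip(chord_positions, weights):
--             string, fret, note = group[(i // w) % len(group)]
--             vec[6 - string] = fret
--         out.append(vec)
--     return out
-- ===== Notes on version B (the rewrite author's own statement) =====
-- stated objective: alternative
-- what changed: Replaces itertools.product enumeration plus an inner fill loop with direct mixed-radix index decoding: B precomputes positional weights (suffix products of group sizes) and computes the k-th vector straight from the index k via group[(k // weight) % len(group)], never materializing combination tuples.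
import Mathlib
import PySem

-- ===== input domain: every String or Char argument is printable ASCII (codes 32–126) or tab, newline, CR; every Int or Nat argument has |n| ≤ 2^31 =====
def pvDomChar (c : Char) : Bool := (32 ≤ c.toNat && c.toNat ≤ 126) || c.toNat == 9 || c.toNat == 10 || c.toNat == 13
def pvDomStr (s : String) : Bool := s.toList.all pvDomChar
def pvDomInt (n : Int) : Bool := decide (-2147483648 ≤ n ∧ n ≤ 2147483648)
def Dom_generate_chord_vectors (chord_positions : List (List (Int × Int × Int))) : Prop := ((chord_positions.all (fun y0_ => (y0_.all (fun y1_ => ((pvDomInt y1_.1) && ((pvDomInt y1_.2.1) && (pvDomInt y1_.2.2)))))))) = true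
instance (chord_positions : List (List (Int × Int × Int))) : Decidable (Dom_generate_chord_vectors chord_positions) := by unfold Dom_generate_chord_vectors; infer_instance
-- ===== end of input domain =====

-- B replaces the Cartesian-product enumeration by direct mixed-radix index decoding
-- (precomputed weights; the k-th vector is computed straight from its index k): alternative algorithm, same output.


-- ===== PORT A =====
-- itertools.product(*chord_positions): first list outermost, last list varies fastest.
def pvProduct (ls : List (List (Int × Int × Int))) : List (List (Int × Int × Int)) :=
  ls.foldr (fun l acc => l.flatMap (fun x => acc.map (x :: ·))) [[]]

def generate_chord_vectors (chord_positions : List (List (Int × Int × Int))) : List (List Int) :=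
  (pvProduct chord_positions).map (fun combination =>
    combination.foldl
      (fun vector t => PySem.List.pySetD vector (6 - t.1) t.2.1)  -- vector[6 - string] = fret
      [-1, -1, -1, -1, -1, -1])

-- ===== PORT B =====
-- total, weights: loop over reversed(chord_positions) appending the running product, then reverse.
def generate_chord_vectors_alt (chord_positions : List (List (Int × Int × Int))) : List (List Int) :=
  let tw := chord_positions.reverse.foldl
    (fun (acc : Int × List Int) group => (acc.1 * (group.length : Int), acc.2 ++ [acc.1])) (1, [])
  let weights := tw.2.reverse
  (PySem.List.pyRange 0 tw.1 1).map (fun i =>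
    (chord_positions.zip weights).foldl
      (fun vec gw =>
        -- group[(i // w) % len(group)]: the index is always in range when the range is nonempty
        let t := PySem.List.pyGetD gw.1
          (PySem.Int.mod (PySem.Int.floordiv i gw.2) ((gw.1.length : Int))) (0, 0, 0)
        PySem.List.pySetD vec (6 - t.1) t.2.1)  -- vec[6 - string] = fret
      [-1, -1, -1, -1, -1, -1])

-- ===== PRECONDITION & SPEC =====
-- Pre_ excludes exactly the inputs where Python A raises IndexError: all groups nonempty and some
-- tuple's string value outside 1..12, so that index 6-string is reached and is outside Python's range.
def Pre_generate_chord_vectors (chord_positions : List (List (Int × Int × Int))) : Prop :=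
  ([] ∈ chord_positions) ∨
  (∀ g ∈ chord_positions, ∀ t ∈ g, PySem.Raise.InRange 6 (6 - t.1))
instance (chord_positions : List (List (Int × Int × Int))) : Decidable (Pre_generate_chord_vectors chord_positions) := by unfold Pre_generate_chord_vectors; infer_instance

def pvWitness_generate_chord_vectors : (List (List (Int × Int × Int))) :=
  [[(6, 1, 0), (5, 2, 0)], [(1, 3, 9), (2, 0, 8)]]

def Spec_generate_chord_vectors (chord_positions : List (List (Int × Int × Int))) (out : List (List Int)) : Prop := out = generate_chord_vectors_alt chord_positions
instance (chord_positions : List (List (Int × Int × Int))) (out : List (List Int)) : Decidable (Spec_generate_chord_vectors chord_positions out) := by unfold Spec_generate_chord_vectors; infer_instance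

-- ===== CLAIM (what is proved, stated in full; the proofs are below) =====
def Claim_equal_generate_chord_vectors : Prop := ∀ (chord_positions : List (List (Int × Int × Int))), Dom_generate_chord_vectors chord_positions → Pre_generate_chord_vectors chord_positions → Spec_generate_chord_vectors chord_positions (generate_chord_vectors chord_positions)

-- ===== LEMMAS AND PROOFS =====

-- Total number of combinations, in B's fold order (product of the group sizes).
def pvTN : List (List (Int × Int × Int)) → Nat
  | [] => 1
  | g :: rest => pvTN rest * g.length

-- Forward weights list: the weight of a group is the product of the sizes of the groups after it.
def pvWf : List (List (Int × Int × Int)) → List Int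
  | [] => []
  | _ :: rest => ((pvTN rest : Nat) : Int) :: pvWf rest

theorem pvProduct_cons (g : List (Int × Int × Int)) (rest : List (List (Int × Int × Int))) :
    pvProduct (g :: rest) = g.flatMap (fun x => (pvProduct rest).map (x :: ·)) := rfl

-- B's weights-and-total loop computes (pvTN, reversed pvWf).
theorem pv_fold_tw (cps : List (List (Int × Int × Int))) :
    cps.reverse.foldl
      (fun (acc : Int × List Int) group => (acc.1 * (group.length : Int), acc.2 ++ [acc.1])) (1, []) =
    (((pvTN cps : Nat) : Int), (pvWf cps).reverse) := by
  rw [List.foldl_reverse]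
  induction cps with
  | nil => simp [pvTN, pvWf]
  | cons g rest ih =>
      simp only [List.foldr_cons, ih, pvTN, pvWf]
      simp [Nat.cast_mul]

theorem pv_length_product (cps : List (List (Int × Int × Int))) :
    (pvProduct cps).length = pvTN cps := by
  induction cps with
  | nil => rfl
  | cons g rest ih =>
      simp only [pvProduct_cons, pvTN]
      simp [List.length_flatMap, ih, List.map_const', Nat.mul_comm]

-- Indexing a flatMap of equal-length blocks.
theorem pv_getD_flatMap (P : List (List (Int × Int × Int))) (g : List (Int × Int × Int)) :
    ∀ (k : Nat), k < g.length * P.length →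
    (g.flatMap (fun x => P.map (x :: ·))).getD k [] =
      (g.getD (k / P.length) (0, 0, 0)) :: P.getD (k % P.length) [] := by
  induction g with
  | nil => intro k hk; simp at hk
  | cons x g' ih =>
      intro k hk
      have hTr : 0 < P.length := by
        rcases Nat.eq_zero_or_pos P.length with h | h
        · rw [h, Nat.mul_zero] at hk; omega
        · exact h
      simp only [List.flatMap_cons]
      by_cases hcase : k < P.length
      · rw [List.getD_append _ _ _ _ (by simp [hcase])]
        rw [Nat.div_eq_of_lt hcase, Nat.mod_eq_of_lt hcase]
        rw [List.getD_eq_getElem _ _ (by simpa using hcase), List.getElem_map,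
            List.getD_eq_getElem _ _ hcase]
        rfl
      · rw [Nat.not_lt] at hcase
        obtain ⟨m, rfl⟩ := Nat.exists_eq_add_of_le hcase
        rw [List.getD_append_right _ _ _ _ (by simp [hcase])]
        have hk' : m < g'.length * P.length := by
          rw [List.length_cons, Nat.succ_mul] at hk; omega
        rw [List.length_map, Nat.add_sub_cancel_left, ih m hk']
        rw [Nat.add_div_left _ hTr, Nat.add_mod_left, List.getD_cons_succ]

-- Decoding with index k equals decoding with index k % total.
theorem pv_decode_mod (cps : List (List (Int × Int × Int))) (k : Nat) (vec : List Int) :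
    (cps.zip (pvWf cps)).foldl
        (fun vec gw =>
          PySem.List.pySetD vec
            (6 - (PySem.List.pyGetD gw.1
              (PySem.Int.mod (PySem.Int.floordiv ((k : Nat) : Int) gw.2) ((gw.1.length : Int))) (0, 0, 0)).1)
            (PySem.List.pyGetD gw.1
              (PySem.Int.mod (PySem.Int.floordiv ((k : Nat) : Int) gw.2) ((gw.1.length : Int))) (0, 0, 0)).2.1) vec =
    (cps.zip (pvWf cps)).foldl
        (fun vec gw =>
          PySem.List.pySetD vec
            (6 - (PySem.List.pyGetD gw.1
              (PySem.Int.mod (PySem.Int.floordiv ((k % pvTN cps : Nat) : Int) gw.2) ((gw.1.length : Int))) (0, 0, 0)).1)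
            (PySem.List.pyGetD gw.1
              (PySem.Int.mod (PySem.Int.floordiv ((k % pvTN cps : Nat) : Int) gw.2) ((gw.1.length : Int))) (0, 0, 0)).2.1) vec := by
  induction cps generalizing k vec with
  | nil => simp [pvWf]
  | cons g rest ih =>
      simp only [pvWf, pvTN, List.zip_cons_cons, List.foldl_cons,
        PySem.Int.floordiv_natCast, PySem.Int.mod_natCast, PySem.List.pyGetD_natCast]
      rw [Nat.mod_mul_right_div_self, Nat.mod_mod]
      rw [ih k, ih (k % (pvTN rest * g.length)), Nat.mod_mul_right_mod]

-- The mixed-radix decode of index k yields exactly the k-th combination of the product.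
theorem pv_decode_eq_product (cps : List (List (Int × Int × Int))) (k : Nat)
    (hk : k < pvTN cps) (vec : List Int) :
    (cps.zip (pvWf cps)).foldl
        (fun vec gw =>
          PySem.List.pySetD vec
            (6 - (PySem.List.pyGetD gw.1
              (PySem.Int.mod (PySem.Int.floordiv ((k : Nat) : Int) gw.2) ((gw.1.length : Int))) (0, 0, 0)).1)
            (PySem.List.pyGetD gw.1
              (PySem.Int.mod (PySem.Int.floordiv ((k : Nat) : Int) gw.2) ((gw.1.length : Int))) (0, 0, 0)).2.1) vec =
    ((pvProduct cps).getD k []).foldl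
      (fun vector t => PySem.List.pySetD vector (6 - t.1) t.2.1) vec := by
  induction cps generalizing k vec with
  | nil =>
      have hk0 : k = 0 := by simp [pvTN] at hk; omega
      subst hk0
      simp [pvWf, pvProduct]
  | cons g rest ih =>
      have hk' : k < pvTN rest * g.length := by simpa [pvTN] using hk
      have hTr : 0 < pvTN rest := by
        rcases Nat.eq_zero_or_pos (pvTN rest) with h | h
        · rw [h, Nat.zero_mul] at hk'; omega
        · exact h
      have hdiv : k / pvTN rest < g.length := Nat.div_lt_of_lt_mul hk'
      simp only [pvWf, List.zip_cons_cons, List.foldl_cons,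
        PySem.Int.floordiv_natCast, PySem.Int.mod_natCast, PySem.List.pyGetD_natCast]
      rw [Nat.mod_eq_of_lt hdiv]
      rw [pv_decode_mod rest k]
      rw [ih (k % pvTN rest) (Nat.mod_lt _ hTr)]
      rw [pvProduct_cons,
        pv_getD_flatMap (pvProduct rest) g k (by rw [pv_length_product, Nat.mul_comm]; exact hk'),
        pv_length_product, List.foldl_cons]

-- ===== VERDICT (by name: the statement is the Claim_ definition above) =====
theorem generate_chord_vectors_spec : Claim_equal_generate_chord_vectors := by
  intro cps _ _
  unfold Spec_generate_chord_vectors generate_chord_vectors generate_chord_vectors_alt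
  simp only [pv_fold_tw, List.reverse_reverse]
  apply List.ext_getElem
  · simp [PySem.List.length_pyRange_one, pv_length_product]
  · intro i h1 h2
    have hi : i < pvTN cps := by
      rw [← pv_length_product]; simpa using h1
    simp only [List.getElem_map, PySem.List.getElem_pyRange_one, zero_add]
    rw [pv_decode_eq_product cps i hi]
    rw [List.getD_eq_getElem]
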